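-- pv_equiv track=rewrite | github.com/matel2394/project | Python.git/Cos Pro 2/빈칸 채우기 모의고사/문제 9.py | solution
-- ===== SOURCE A (Python) =====
-- def solution(cars,speed):
--     answer = 0
--     for i in cars:
--         if i >= speed * 110//100 and i < speed * 120//100:
--             answer += 3
--         elif i >= speed * 120//100 and i < speed * 130//100:
--             answer += 5
--         elif i >= speed * 130//100:
--             answer += 7
--     return answer
-- ===== SOURCE B (Python) =====
-- def solution(cars, speed):
--     t1 = speed * 110 // 100
--     t2 = speed * 120 // 100
--     t3 = speed * 130 // 100
--     c3 = sum(1 for i in cars if t1 <= i < t2)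
--     c5 = sum(1 for i in cars if t2 <= i < t3)
--     c7 = sum(1 for i in cars if i >= t3)
--     return 3 * c3 + 5 * c5 + 7 * c7
-- ===== Notes on version B (the rewrite author's own statement) =====
-- stated objective: alternative
-- what changed: Replaces the single loop with a mutually-exclusive elif chain by three independent interval/threshold counts (cars in [t110,t120), in [t120,t130), and >= t130, with the thresholds computed once) combined as 3*c1+5*c2+7*c3.
import Mathlib
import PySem

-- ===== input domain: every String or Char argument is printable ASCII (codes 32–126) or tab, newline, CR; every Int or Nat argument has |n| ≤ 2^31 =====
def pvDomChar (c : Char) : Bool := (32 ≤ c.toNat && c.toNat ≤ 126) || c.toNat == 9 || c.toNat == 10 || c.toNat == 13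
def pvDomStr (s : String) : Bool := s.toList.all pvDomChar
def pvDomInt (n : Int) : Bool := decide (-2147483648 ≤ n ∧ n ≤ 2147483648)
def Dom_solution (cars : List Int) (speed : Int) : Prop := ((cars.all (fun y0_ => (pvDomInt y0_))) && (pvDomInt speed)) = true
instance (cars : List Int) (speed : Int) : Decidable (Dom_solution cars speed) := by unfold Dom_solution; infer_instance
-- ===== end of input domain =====

-- B replaces A's one-pass mutually-exclusive elif chain by three independent
-- interval counts combined linearly; same O(n) cost, different decomposition.

-- ===== PORT A =====
-- literal transliteration of A: one fold, elif chain, thresholds recomputed per car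
def solution (cars : List Int) (speed : Int) : Int :=
  cars.foldl (fun answer i =>
    if i ≥ PySem.Int.floordiv (speed * 110) 100 ∧ i < PySem.Int.floordiv (speed * 120) 100 then
      answer + 3
    else if i ≥ PySem.Int.floordiv (speed * 120) 100 ∧ i < PySem.Int.floordiv (speed * 130) 100 then
      answer + 5
    else if i ≥ PySem.Int.floordiv (speed * 130) 100 then
      answer + 7
    else answer) 0

-- ===== PORT B =====
-- literal transliteration of B: three counting passes, combined at the end
def solution_alt (cars : List Int) (speed : Int) : Int :=
  let t1 := PySem.Int.floordiv (speed * 110) 100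
  let t2 := PySem.Int.floordiv (speed * 120) 100
  let t3 := PySem.Int.floordiv (speed * 130) 100
  let c3 : Int := (cars.countP (fun i => decide (t1 ≤ i ∧ i < t2)) : Int)
  let c5 : Int := (cars.countP (fun i => decide (t2 ≤ i ∧ i < t3)) : Int)
  let c7 : Int := (cars.countP (fun i => decide (i ≥ t3)) : Int)
  3 * c3 + 5 * c5 + 7 * c7

-- ===== PRECONDITION & SPEC =====
def Spec_solution (cars : List Int) (speed : Int) (out : Int) : Prop := out = solution_alt cars speed
instance (cars : List Int) (speed : Int) (out : Int) : Decidable (Spec_solution cars speed out) := by unfold Spec_solution; infer_instance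

-- ===== CLAIM (what is proved, stated in full; the proofs are below) =====
def Claim_equal_solution : Prop := ∀ (cars : List Int) (speed : Int), Dom_solution cars speed → Spec_solution cars speed (solution cars speed)

-- ===== LEMMAS AND PROOFS =====

-- abstract loop fact: with t2 ≤ t1 or t2 ≤ t3 the exclusive elif chain equals
-- the sum of the three independent counts
theorem pv_loop_eq (t1 t2 t3 : Int) (h : t2 ≤ t1 ∨ t2 ≤ t3) :
    ∀ (cars : List Int) (acc : Int),
    cars.foldl (fun answer i =>
      if i ≥ t1 ∧ i < t2 then answer + 3
      else if i ≥ t2 ∧ i < t3 then answer + 5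
      else if i ≥ t3 then answer + 7
      else answer) acc
    = acc + 3 * (cars.countP (fun i => decide (t1 ≤ i ∧ i < t2)) : Int)
          + 5 * (cars.countP (fun i => decide (t2 ≤ i ∧ i < t3)) : Int)
          + 7 * (cars.countP (fun i => decide (i ≥ t3)) : Int) := by
  intro cars
  induction cars with
  | nil => intro acc; simp
  | cons x xs ih =>
    intro acc
    simp only [List.foldl_cons, List.countP_cons, ih]
    rcases h with h | h <;> split_ifs <;> simp only [decide_eq_true_eq] at * <;> push_cast <;> omega

theorem pv_thresholds (speed : Int) :
    PySem.Int.floordiv (speed * 120) 100 ≤ PySem.Int.floordiv (speed * 110) 100 ∨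
    PySem.Int.floordiv (speed * 120) 100 ≤ PySem.Int.floordiv (speed * 130) 100 := by
  rw [PySem.Int.floordiv_eq_ediv_of_pos (a := speed * 110) (by omega),
      PySem.Int.floordiv_eq_ediv_of_pos (a := speed * 120) (by omega),
      PySem.Int.floordiv_eq_ediv_of_pos (a := speed * 130) (by omega)]
  by_cases hs : 0 ≤ speed
  · right; exact Int.ediv_le_ediv (by omega) (by nlinarith)
  · left; exact Int.ediv_le_ediv (by omega) (by nlinarith)

-- ===== VERDICT (by name: the statement is the Claim_ definition above) =====
theorem solution_spec : Claim_equal_solution := by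
  intro cars speed _
  unfold Spec_solution solution solution_alt
  rw [pv_loop_eq _ _ _ (pv_thresholds speed)]
  ring
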